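-- pv_equiv track=rewrite | github.com/feizhen/coursera-course | Algorithmic-Toolbox/week2/fibonacci_again.py | fibonacci_again
-- ===== SOURCE A (Python) =====
-- def fibonacci(n):
--     fib = [0, 1]
--     for x in range(2, n+1):
--         fib.append(fib[x-1] + fib[x-2])
--     return fib[n]
--
-- def fibonacci_again(n, m):
--     fib = [0, 1, 1]
--     is_periodic = False
--     period = 0
--     for x in range(3, n+1):
--         cur = fibonacci(x) % m
--         fib.append(cur)
--         if fib[x] == 1 and fib[x-1] == 0:
--             is_periodic = True
--             period = x - 1
--             break
--     if is_periodic: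
--         sm = n % period
--         return fibonacci(sm) % m
--     else:
--         return fib[n]
-- ===== SOURCE B (Python) =====
-- def fibonacci_again(n, m):
--     # fast doubling: fd(k) = (F(k) % m, F(k+1) % m), computed in O(log k)
--     def fd(k):
--         if k == 0:
--             return (0, 1 % m)
--         a, b = fd(k // 2)
--         c = a * (2 * b - a) % m
--         d = (a * a + b * b) % m
--         if k % 2 == 0:
--             return (c, d)
--         else:
--             return (d, (c + d) % m)
--     return fd(n)[0]
-- ===== Notes on version B (the rewrite author's own statement) =====
-- stated objective: faster
-- what changed: A recomputes the whole bignum Fibonacci list from scratch at every loop step while hunting for the Pisano period; B computes F(n) mod m directly by fast doubling in O(log n) multiplications, with all intermediates reduced mod m.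
-- intended difference: For n in {1,2} with m = 1 or m < 0, A returns the unreduced seed value 1 from its hard-coded [0,1,1] prefix, while B returns 1 % m (0 for m=1, 1+m for m<0), the correctly reduced Fibonacci value mod m, which is the intended result. — e.g. on fibonacci_again(1, 1): A returns 1, B returns 0
-- outside the precondition, e.g. on fibonacci_again(-1, 5): A returns 1, B raises RecursionError; on fibonacci_again(2, 0): A returns 1, B raises ZeroDivisionError
import Mathlib
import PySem

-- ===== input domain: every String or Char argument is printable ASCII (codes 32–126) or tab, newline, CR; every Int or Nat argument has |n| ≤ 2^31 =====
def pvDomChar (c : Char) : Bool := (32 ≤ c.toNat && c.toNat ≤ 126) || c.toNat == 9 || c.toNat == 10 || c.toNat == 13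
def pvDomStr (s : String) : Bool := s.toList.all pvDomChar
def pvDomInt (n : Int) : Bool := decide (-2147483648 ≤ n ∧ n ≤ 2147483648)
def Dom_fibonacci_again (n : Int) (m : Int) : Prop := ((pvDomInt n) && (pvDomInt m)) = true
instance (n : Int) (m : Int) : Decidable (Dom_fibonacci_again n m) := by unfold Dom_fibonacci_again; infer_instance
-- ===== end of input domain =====

-- B replaces A's quadratic-and-bignum Pisano-period search by O(log n) fast doubling mod m (return value only; A mutates nothing).

-- ===== PORT A =====
-- helper fibonacci(n): builds the full list [F0..Fn] and indexes it.
-- pyGetD is used where Python indexes; inside Pre_ every index A evaluates is in range, so no IndexError is hidden.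
def fibonacci_again_fib (n : Int) : Int :=
  let fib := (PySem.List.pyRange 2 (n+1) 1).foldl
    (fun fib x => fib ++ [PySem.List.pyGetD fib (x-1) 0 + PySem.List.pyGetD fib (x-2) 0]) [0, 1]
  PySem.List.pyGetD fib n 0

-- the for-loop of fibonacci_again with its break, as structural recursion over the range list;
-- returns (is_periodic, period, fib)
def fibonacci_again_loop (m : Int) : List Int → List Int → Bool × Int × List Int
  | [], fib => (false, 0, fib)
  | x :: xs, fib =>
      let cur := PySem.Int.mod (fibonacci_again_fib x) m
      let fib2 := fib ++ [cur]
      if PySem.List.pyGetD fib2 x 0 = 1 ∧ PySem.List.pyGetD fib2 (x-1) 0 = 0 then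
        (true, x - 1, fib2)
      else
        fibonacci_again_loop m xs fib2

def fibonacci_again (n : Int) (m : Int) : Int :=
  let r := fibonacci_again_loop m (PySem.List.pyRange 3 (n+1) 1) [0, 1, 1]
  if r.1 then
    PySem.Int.mod (fibonacci_again_fib (PySem.Int.mod n r.2.1)) m
  else
    PySem.List.pyGetD r.2.2 n 0

-- ===== PORT B =====
-- fd(k) = (F(k) % m, F(k+1) % m) by fast doubling.  Python tests 'k == 0'; the guard 'k ≤ 0'
-- only additionally stops on k < 0, where Python's recursion does not terminate (outside Pre_).
def fibonacci_again_fd (m : Int) (k : Int) : Int × Int :=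
  if k ≤ 0 then (0, PySem.Int.mod 1 m)
  else
    let p := fibonacci_again_fd m (PySem.Int.floordiv k 2)
    let a := p.1
    let b := p.2
    let c := PySem.Int.mod (a * (2 * b - a)) m
    let d := PySem.Int.mod (a * a + b * b) m
    if PySem.Int.mod k 2 = 0 then (c, d) else (d, PySem.Int.mod (c + d) m)
termination_by k.toNat
decreasing_by
  have h2 : PySem.Int.floordiv k 2 = k / 2 := PySem.Int.floordiv_eq_ediv_of_pos (by norm_num)
  rw [h2]; omega

def fibonacci_again_alt (n : Int) (m : Int) : Int :=
  (fibonacci_again_fd m n).1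

-- ===== PRECONDITION & SPEC =====
-- Pre_ excludes m = 0 (A raises ZeroDivisionError for n ≥ 3; for n ≤ 2 A returns an unreduced seed while B raises
-- ZeroDivisionError) and negative n (A raises IndexError for n ≤ -4 and returns accidental negative-index wraparound
-- values for -3 ≤ n ≤ -1; B's recursion does not terminate there).
def Pre_fibonacci_again (n : Int) (m : Int) : Prop := 0 ≤ n ∧ m ≠ 0
instance (n : Int) (m : Int) : Decidable (Pre_fibonacci_again n m) := by unfold Pre_fibonacci_again; infer_instance
def pvWitness_fibonacci_again : Int × Int := (10, 3)

-- For n ∈ {1, 2} with m = 1 or m < 0 A returns the unreduced seed value 1, while B returns 1 % m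
-- (0 for m = 1, 1 + m for m < 0), the correctly reduced Fibonacci value mod m, which is the intended result.
def D_fibonacci_again (n : Int) (m : Int) : Prop := (n = 1 ∨ n = 2) ∧ (m = 1 ∨ m < 0)
instance (n : Int) (m : Int) : Decidable (D_fibonacci_again n m) := by unfold D_fibonacci_again; infer_instance

def Spec_fibonacci_again (n : Int) (m : Int) (out : Int) : Prop := ¬ D_fibonacci_again n m → out = fibonacci_again_alt n m
instance (n : Int) (m : Int) (out : Int) : Decidable (Spec_fibonacci_again n m out) := by unfold Spec_fibonacci_again; infer_instance

def pvDiffWitness_fibonacci_again : Int × Int := (1, 1)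
def pvDiffWitnessOut_fibonacci_again : Int × Int := (1, 0)

-- ===== CLAIM (what is proved, stated in full; the proofs are below) =====
def Claim_unchanged_fibonacci_again : Prop := ∀ (n : Int) (m : Int), Dom_fibonacci_again n m → Pre_fibonacci_again n m → Spec_fibonacci_again n m (fibonacci_again n m)
def Claim_changed_fibonacci_again : Prop := Dom_fibonacci_again (pvDiffWitness_fibonacci_again.1) (pvDiffWitness_fibonacci_again.2) ∧ Pre_fibonacci_again (pvDiffWitness_fibonacci_again.1) (pvDiffWitness_fibonacci_again.2) ∧ D_fibonacci_again (pvDiffWitness_fibonacci_again.1) (pvDiffWitness_fibonacci_again.2) ∧ fibonacci_again (pvDiffWitness_fibonacci_again.1) (pvDiffWitness_fibonacci_again.2) = pvDiffWitnessOut_fibonacci_again.1 ∧ fibonacci_again_alt (pvDiffWitness_fibonacci_again.1) (pvDiffWitness_fibonacci_again.2) = pvDiffWitnessOut_fibonacci_again.2 ∧ pvDiffWitnessOut_fibonacci_again.1 ≠ pvDiffWitnessOut_fibonacci_again.2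
def Claim_exact_fibonacci_again : Prop := ∀ (n : Int) (m : Int), Dom_fibonacci_again n m → Pre_fibonacci_again n m → D_fibonacci_again n m → fibonacci_again n m ≠ fibonacci_again_alt n m

-- ===== LEMMAS AND PROOFS =====

-- ---- Python floor-mod as a congruence ----
theorem pv_mod_dvd_sub (a m : Int) : m ∣ (a - PySem.Int.mod a m) :=
  ⟨PySem.Int.floordiv a m, by linear_combination - PySem.Int.floordiv_mul_add_mod a m⟩

theorem pv_mod_modeq (a m : Int) : PySem.Int.mod a m ≡ a [ZMOD m] :=
  (Int.modEq_iff_dvd).mpr (pv_mod_dvd_sub a m)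

theorem pv_mod_congr {m a b : Int} (hm : m ≠ 0) (h : a ≡ b [ZMOD m]) :
    PySem.Int.mod a m = PySem.Int.mod b m := by
  have h2 : PySem.Int.mod a m ≡ PySem.Int.mod b m [ZMOD m] :=
    (pv_mod_modeq a m).trans (h.trans (pv_mod_modeq b m).symm)
  have hd : m ∣ (PySem.Int.mod b m - PySem.Int.mod a m) := Int.ModEq.dvd h2
  rcases lt_or_gt_of_ne hm with hneg | hpos
  · have b1 := PySem.Int.mod_neg_bounds (a := a) hneg
    have b2 := PySem.Int.mod_neg_bounds (a := b) hneg
    have hz : PySem.Int.mod b m - PySem.Int.mod a m = 0 := by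
      refine Int.eq_zero_of_abs_lt_dvd ((neg_dvd).mpr hd) ?_
      rw [abs_lt]; constructor <;> omega
    omega
  · have b1n := PySem.Int.mod_nonneg (a := a) hpos
    have b1l := PySem.Int.mod_lt (a := a) hpos
    have b2n := PySem.Int.mod_nonneg (a := b) hpos
    have b2l := PySem.Int.mod_lt (a := b) hpos
    have hz : PySem.Int.mod b m - PySem.Int.mod a m = 0 := by
      refine Int.eq_zero_of_abs_lt_dvd hd ?_
      rw [abs_lt]; constructor <;> omega
    omega

theorem pv_mod_zero_left (m : Int) (hm : m ≠ 0) : PySem.Int.mod 0 m = 0 := by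
  have h := pv_mod_dvd_sub 0 m
  rcases lt_or_gt_of_ne hm with hneg | hpos
  · have b1 := PySem.Int.mod_neg_bounds (a := (0:Int)) hneg
    have := Int.eq_zero_of_abs_lt_dvd ((neg_dvd).mpr (by simpa using h.neg_right)) (by rw [abs_lt]; constructor <;> omega)
    omega
  · have b1n := PySem.Int.mod_nonneg (a := (0:Int)) hpos
    have b1l := PySem.Int.mod_lt (a := (0:Int)) hpos
    have := Int.eq_zero_of_abs_lt_dvd (by simpa using h.neg_right) (by rw [abs_lt]; constructor <;> omega)
    omega

theorem pv_mod_one_of_two_le {m : Int} (hm : 2 ≤ m) : PySem.Int.mod 1 m = 1 := by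
  rw [PySem.Int.mod_eq_emod_of_pos (by omega)]
  exact Int.emod_eq_of_lt (by omega) (by omega)

-- ---- fast-doubling identities over Int ----
theorem pv_fib_two_mul_int (j : Nat) :
    (Nat.fib (2 * j) : Int) = (Nat.fib j : Int) * (2 * (Nat.fib (j+1) : Int) - (Nat.fib j : Int)) := by
  have hle : Nat.fib j ≤ 2 * Nat.fib (j+1) :=
    le_trans (Nat.fib_le_fib_succ) (by omega)
  rw [Nat.fib_two_mul]
  push_cast [hle]
  ring

theorem pv_fib_two_mul_add_one_int (j : Nat) :
    (Nat.fib (2 * j + 1) : Int) = (Nat.fib (j+1) : Int) * (Nat.fib (j+1) : Int) + (Nat.fib j : Int) * (Nat.fib j : Int) := by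
  rw [Nat.fib_two_mul_add_one]
  push_cast
  ring

-- ---- B-side characterisation: fd(k) = (F(k) % m, F(k+1) % m) ----
theorem pv_fd_eq (m : Int) (hm : m ≠ 0) : ∀ k : Nat,
    fibonacci_again_fd m (k : Int) =
      (PySem.Int.mod (Nat.fib k) m, PySem.Int.mod (Nat.fib (k+1)) m) := by
  intro k
  induction k using Nat.strong_induction_on with
  | _ k ih =>
    rcases Nat.eq_zero_or_pos k with hk0 | hkpos
    · subst hk0
      rw [fibonacci_again_fd]
      simp [pv_mod_zero_left m hm]
    · rw [fibonacci_again_fd]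
      have hknot : ¬ ((k : Int) ≤ 0) := by exact_mod_cast by omega
      rw [if_neg hknot]
      have hfd : PySem.Int.floordiv (k : Int) 2 = ((k / 2 : Nat) : Int) := by
        exact_mod_cast PySem.Int.floordiv_natCast k 2
      rw [hfd, ih (k / 2) (by omega)]
      set j := k / 2 with hj
      have ha : (PySem.Int.mod (Nat.fib j) m) ≡ (Nat.fib j : Int) [ZMOD m] := pv_mod_modeq _ m
      have hb : (PySem.Int.mod (Nat.fib (j+1)) m) ≡ (Nat.fib (j+1) : Int) [ZMOD m] := pv_mod_modeq _ m
      have hc : PySem.Int.mod (PySem.Int.mod (Nat.fib j) m * (2 * PySem.Int.mod (Nat.fib (j+1)) m - PySem.Int.mod (Nat.fib j) m)) m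
          = PySem.Int.mod (Nat.fib (2 * j)) m := by
        refine pv_mod_congr hm ?_
        rw [pv_fib_two_mul_int j]
        exact (ha.mul ((Int.ModEq.refl 2).mul hb |>.sub ha))
      have hd : PySem.Int.mod (PySem.Int.mod (Nat.fib j) m * PySem.Int.mod (Nat.fib j) m + PySem.Int.mod (Nat.fib (j+1)) m * PySem.Int.mod (Nat.fib (j+1)) m) m
          = PySem.Int.mod (Nat.fib (2 * j + 1)) m := by
        refine pv_mod_congr hm ?_
        have he : (Nat.fib j : Int) * (Nat.fib j : Int) + (Nat.fib (j+1) : Int) * (Nat.fib (j+1) : Int) = (Nat.fib (2*j+1) : Int) := by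
          rw [pv_fib_two_mul_add_one_int j]; ring
        rw [← he]
        exact (ha.mul ha).add (hb.mul hb)
      have hmod2 : PySem.Int.mod (k : Int) 2 = ((k % 2 : Nat) : Int) := by
        exact_mod_cast PySem.Int.mod_natCast k 2
      simp only [hmod2]
      rcases Nat.even_or_odd k with he | ho
      · have hk2 : k % 2 = 0 := Nat.even_iff.mp he
        have hkj : 2 * j = k := by omega
        rw [if_pos (by rw [hk2]; norm_num)]
        simp only [hc, hd, hkj]
      · have hk2 : k % 2 = 1 := Nat.odd_iff.mp ho
        have hkj : 2 * j + 1 = k := by omega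
        rw [if_neg (by rw [hk2]; norm_num)]
        have hsum : PySem.Int.mod (PySem.Int.mod (Nat.fib (2*j)) m + PySem.Int.mod (Nat.fib (2*j+1)) m) m
            = PySem.Int.mod (Nat.fib (k+1)) m := by
          refine pv_mod_congr hm ?_
          have : (Nat.fib (2*j) : Int) + (Nat.fib (2*j+1) : Int) = (Nat.fib (k+1) : Int) := by
            have h2 : Nat.fib (2*j) + Nat.fib (2*j+1) = Nat.fib (2*j+2) := (Nat.fib_add_two).symm
            have h3 : 2*j+2 = k+1 := by omega
            rw [← h3, ← h2]
            push_cast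
            ring
          calc PySem.Int.mod (Nat.fib (2*j)) m + PySem.Int.mod (Nat.fib (2*j+1)) m
              ≡ (Nat.fib (2*j) : Int) + (Nat.fib (2*j+1) : Int) [ZMOD m] := (pv_mod_modeq _ m).add (pv_mod_modeq _ m)
            _ = (Nat.fib (k+1) : Int) := this
        rw [hkj] at hsum
        simp only [hc, hd, hkj]
        rw [hsum]

theorem pv_alt_eq (m : Int) (hm : m ≠ 0) (k : Nat) :
    fibonacci_again_alt (k : Int) m = PySem.Int.mod (Nat.fib k) m := by
  unfold fibonacci_again_alt
  rw [pv_fd_eq m hm k]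

-- ---- A-side: the helper builds [F0..Fn] ----
def pvFibList (n : Nat) : List Int := (List.range (n+1)).map (fun i => (Nat.fib i : Int))

theorem pv_pyGetD_fibList (n t : Nat) (ht : t ≤ n) :
    PySem.List.pyGetD (pvFibList n) (t : Int) 0 = (Nat.fib t : Int) := by
  rw [PySem.List.pyGetD_natCast]
  unfold pvFibList
  rw [List.getD_eq_getElem?_getD, List.getElem?_map, List.getElem?_range (by omega)]
  rfl

theorem pv_fib_fold (j : Nat) (hj : 1 ≤ j) :
    (PySem.List.pyRange 2 ((j : Int)+1) 1).foldl
      (fun fib x => fib ++ [PySem.List.pyGetD fib (x-1) 0 + PySem.List.pyGetD fib (x-2) 0]) [0, 1]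
    = pvFibList j := by
  induction j, hj using Nat.le_induction with
  | base =>
    have : PySem.List.pyRange 2 (((1:Nat) : Int)+1) 1 = [] :=
      PySem.List.pyRange_one_eq_nil (by norm_num)
    rw [this]
    decide
  | succ j hj ih =>
    have hsplit : PySem.List.pyRange 2 ((↑(j+1) : Int)+1) 1
        = PySem.List.pyRange 2 ((j : Int)+1) 1 ++ [(j : Int)+1] := by
      have hcast : ((↑(j+1) : Int)+1) = ((j : Int)+1)+1 := by push_cast; ring
      rw [hcast]
      exact PySem.List.pyRange_one_succ_right (by omega)
    rw [hsplit, List.foldl_append, ih]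
    simp only [List.foldl_cons, List.foldl_nil]
    have h1 : ((j : Int)+1) - 1 = ((j : Nat) : Int) := by ring
    have h2 : ((j : Int)+1) - 2 = ((j - 1 : Nat) : Int) := by
      have : ((j - 1 : Nat) : Int) = (j : Int) - 1 := by omega
      rw [this]; ring
    rw [h1, h2, pv_pyGetD_fibList j j (le_refl j), pv_pyGetD_fibList j (j-1) (by omega)]
    unfold pvFibList
    rw [show j + 1 + 1 = (j + 1) + 1 from rfl, List.range_succ (n := j+1), List.map_append]
    congr 1
    simp only [List.map_cons, List.map_nil]
    congr 1
    have : Nat.fib (j+1) = Nat.fib (j-1) + Nat.fib j := by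
      have h := Nat.fib_add_two (n := j - 1)
      have hj1 : j - 1 + 2 = j + 1 := by omega
      have hj2 : j - 1 + 1 = j := by omega
      rw [hj1, hj2] at h
      exact h
    rw [this]
    push_cast
    ring

theorem pv_fibhelper_eq (k : Nat) : fibonacci_again_fib (k : Int) = (Nat.fib k : Int) := by
  rcases Nat.lt_or_ge k 1 with hk | hk
  · interval_cases k
    decide
  · unfold fibonacci_again_fib
    rw [pv_fib_fold k hk]
    exact pv_pyGetD_fibList k k (le_refl k)

-- ---- Fibonacci periodicity mod m ----
theorem pv_fib_period (m : Int) (p : Nat)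
    (h0 : (Nat.fib p : Int) ≡ 0 [ZMOD m]) (h1 : (Nat.fib (p+1) : Int) ≡ 1 [ZMOD m]) :
    ∀ k : Nat, (Nat.fib (k + p) : Int) ≡ (Nat.fib k : Int) [ZMOD m] := by
  intro k
  induction k using Nat.strong_induction_on with
  | _ k ih =>
    match k with
    | 0 => simpa using h0
    | 1 => simpa [Nat.add_comm] using h1
    | (k+2) =>
      have h2 : Nat.fib (k + 2 + p) = Nat.fib (k + p) + Nat.fib (k + 1 + p) := by
        have := Nat.fib_add_two (n := k + p)
        have he : k + p + 2 = k + 2 + p := by omega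
        have he2 : k + p + 1 = k + 1 + p := by omega
        rw [he, he2] at this
        exact this
      have h3 : Nat.fib (k + 2) = Nat.fib k + Nat.fib (k + 1) := Nat.fib_add_two
      rw [h2, h3]
      push_cast
      exact (ih k (by omega)).add (ih (k+1) (by omega))

theorem pv_fib_period_mul (m : Int) (p : Nat)
    (h0 : (Nat.fib p : Int) ≡ 0 [ZMOD m]) (h1 : (Nat.fib (p+1) : Int) ≡ 1 [ZMOD m]) :
    ∀ q r : Nat, (Nat.fib (r + q * p) : Int) ≡ (Nat.fib r : Int) [ZMOD m] := by
  intro q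
  induction q with
  | zero => intro r; simp
  | succ q ih =>
    intro r
    have he : r + (q+1) * p = (r + q * p) + p := by ring
    rw [he]
    exact (pv_fib_period m p h0 h1 (r + q * p)).trans (ih r)

theorem pv_fib_mod_reduce (m : Int) (p : Nat) (_hp : 0 < p)
    (h0 : (Nat.fib p : Int) ≡ 0 [ZMOD m]) (h1 : (Nat.fib (p+1) : Int) ≡ 1 [ZMOD m]) (n : Nat) :
    (Nat.fib n : Int) ≡ (Nat.fib (n % p) : Int) [ZMOD m] := by
  have he : n = n % p + (n / p) * p := by
    rw [Nat.mul_comm]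
    exact (Nat.mod_add_div n p).symm
  calc (Nat.fib n : Int) = (Nat.fib (n % p + (n / p) * p) : Int) := by rw [← he]
    _ ≡ (Nat.fib (n % p) : Int) [ZMOD m] := pv_fib_period_mul m p h0 h1 (n / p) (n % p)

-- ---- A-side: the list carried by the loop ----
def pvFibModList (m : Int) (j : Nat) : List Int :=
  [0, 1, 1] ++ (List.range (j-2)).map (fun i => PySem.Int.mod (Nat.fib (i+3)) m)

theorem pv_fml_append (m : Int) (j : Nat) (hj : 2 ≤ j) :
    pvFibModList m j ++ [PySem.Int.mod (Nat.fib (j+1)) m] = pvFibModList m (j+1) := by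
  unfold pvFibModList
  rw [List.append_assoc]
  congr 1
  have h1 : j + 1 - 2 = (j - 2) + 1 := by omega
  rw [h1, List.range_succ, List.map_append]
  congr 1
  simp only [List.map_cons, List.map_nil]
  have h32 : j - 2 + 3 = j + 1 := by omega
  rw [h32]

theorem pv_fml_get_low (m : Int) (j t : Nat) (ht : t ≤ 2) :
    PySem.List.pyGetD (pvFibModList m j) (t : Int) 0 = if t = 0 then 0 else 1 := by
  rw [PySem.List.pyGetD_natCast]
  unfold pvFibModList
  interval_cases t <;> rfl

theorem pv_fml_get (m : Int) (j t : Nat) (h3 : 3 ≤ t) (ht : t ≤ j) :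
    PySem.List.pyGetD (pvFibModList m j) (t : Int) 0 = PySem.Int.mod (Nat.fib t) m := by
  rw [PySem.List.pyGetD_natCast]
  unfold pvFibModList
  rw [List.getD_eq_getElem?_getD, List.getElem?_append_right (by simp; omega)]
  simp only [List.length_cons, List.length_nil]
  rw [List.getElem?_map, List.getElem?_range (by omega)]
  have : t - 3 + 3 = t := by omega
  simp [this]

-- ---- A-side loop characterisation ----
theorem pv_loop_cons (m x : Int) (xs fib : List Int) :
    fibonacci_again_loop m (x :: xs) fib =
      if PySem.List.pyGetD (fib ++ [PySem.Int.mod (fibonacci_again_fib x) m]) x 0 = 1 ∧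
         PySem.List.pyGetD (fib ++ [PySem.Int.mod (fibonacci_again_fib x) m]) (x-1) 0 = 0 then
        (true, x - 1, fib ++ [PySem.Int.mod (fibonacci_again_fib x) m])
      else fibonacci_again_loop m xs (fib ++ [PySem.Int.mod (fibonacci_again_fib x) m]) := rfl

theorem pv_loop_run (m : Int) (hm : m ≠ 0) (n : Nat) (hn : 3 ≤ n) :
    ∀ fuel x : Nat, 3 ≤ x → x ≤ n + 1 → n + 1 - x = fuel →
    (let r := fibonacci_again_loop m (PySem.List.pyRange (x : Int) ((n : Int)+1) 1) (pvFibModList m (x-1));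
     (if r.1 then PySem.Int.mod (fibonacci_again_fib (PySem.Int.mod (n : Int) r.2.1)) m
      else PySem.List.pyGetD r.2.2 (n : Int) 0))
    = PySem.Int.mod (Nat.fib n) m := by
  intro fuel
  induction fuel with
  | zero =>
    intro x h3 hxn hfuel
    have hx : x = n + 1 := by omega
    subst hx
    rw [PySem.List.pyRange_one_eq_nil (by exact_mod_cast by omega)]
    simp only [fibonacci_again_loop]
    have : n + 1 - 1 = n := by omega
    rw [this]
    exact pv_fml_get m n n hn (le_refl n)
  | succ fuel ih =>
    intro x h3 hxn hfuel
    have hxle : x ≤ n := by omega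
    rw [PySem.List.pyRange_one_cons (by omega), pv_loop_cons, pv_fibhelper_eq x]
    have happ : pvFibModList m (x-1) ++ [PySem.Int.mod ((Nat.fib x : Nat) : Int) m] = pvFibModList m x := by
      have h := pv_fml_append m (x-1) (by omega)
      have hx1 : x - 1 + 1 = x := by omega
      rw [hx1] at h
      exact h
    rw [happ]
    have hgx : PySem.List.pyGetD (pvFibModList m x) (x : Int) 0 = PySem.Int.mod (Nat.fib x) m :=
      pv_fml_get m x x h3 (le_refl x)
    have hc1 : (x : Int) - 1 = ((x - 1 : Nat) : Int) := by omega
    have hnext : (x : Int) + 1 = ((x + 1 : Nat) : Int) := by omega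
    rcases Nat.eq_or_lt_of_le h3 with hx3 | hx4
    · -- x = 3: fib2[x-1] is the unreduced seed 1, the break cannot fire
      have hglow : PySem.List.pyGetD (pvFibModList m x) ((x : Int) - 1) 0 = 1 := by
        rw [hc1, pv_fml_get_low m x (x-1) (by omega)]
        simp [← hx3]
      have hcf : ¬ (PySem.Int.mod ((Nat.fib x : Nat) : Int) m = 1 ∧ (1:Int) = 0) :=
        fun h => one_ne_zero h.2
      rw [hgx, hglow, if_neg hcf]
      rw [hnext]
      exact ih (x+1) (by omega) (by omega) (by omega)
    · have hglow : PySem.List.pyGetD (pvFibModList m x) ((x : Int) - 1) 0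
          = PySem.Int.mod (Nat.fib (x-1)) m := by
        rw [hc1]
        exact pv_fml_get m x (x-1) (by omega) (by omega)
      rw [hgx, hglow]
      by_cases hcond : PySem.Int.mod (Nat.fib x) m = 1 ∧ PySem.Int.mod (Nat.fib (x-1)) m = 0
      · rw [if_pos hcond]
        simp only []
        have h0 : (Nat.fib (x-1) : Int) ≡ 0 [ZMOD m] := by
          have := (pv_mod_modeq ((Nat.fib (x-1) : Nat) : Int) m).symm
          rw [hcond.2] at this
          exact this
        have h1 : (Nat.fib ((x-1)+1) : Int) ≡ 1 [ZMOD m] := by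
          have := (pv_mod_modeq ((Nat.fib x : Nat) : Int) m).symm
          rw [hcond.1] at this
          have hx1 : x - 1 + 1 = x := by omega
          rw [hx1]
          exact this
        have hmodn : PySem.Int.mod (n : Int) ((x : Int) - 1) = ((n % (x-1) : Nat) : Int) := by
          rw [hc1]
          exact_mod_cast PySem.Int.mod_natCast n (x-1)
        rw [hmodn, pv_fibhelper_eq (n % (x-1))]
        exact (pv_mod_congr hm (pv_fib_mod_reduce m (x-1) (by omega) h0 h1 n)).symm
      · rw [if_neg hcond]
        rw [hnext]
        exact ih (x+1) (by omega) (by omega) (by omega)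

-- ---- A-side final characterisation ----
theorem pv_A_eq (n : Nat) (m : Int) (hm : m ≠ 0) (hnd : ¬ D_fibonacci_again (n : Int) m) :
    fibonacci_again (n : Int) m = PySem.Int.mod (Nat.fib n) m := by
  rcases Nat.lt_or_ge n 3 with hn | hn
  · unfold fibonacci_again
    rw [PySem.List.pyRange_one_eq_nil (by omega)]
    simp only [fibonacci_again_loop]
    have hm2 : n = 0 ∨ 2 ≤ m := by
      unfold D_fibonacci_again at hnd
      by_cases h0 : n = 0
      · exact Or.inl h0
      · right
        have hn12 : (n : Int) = 1 ∨ (n : Int) = 2 := by omega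
        rcases lt_or_gt_of_ne hm with h | h
        · exact absurd ⟨hn12, Or.inr h⟩ hnd
        · by_cases h1 : m = 1
          · exact absurd ⟨hn12, Or.inl h1⟩ hnd
          · omega
    rw [if_neg (by simp)]
    rcases hm2 with rfl | hm2
    · simp only [Nat.fib_zero, Nat.cast_zero, pv_mod_zero_left m hm, Nat.cast_zero]
      decide
    · interval_cases n
      · simp only [Nat.fib_zero, Nat.cast_zero, pv_mod_zero_left m hm]
        decide
      · simp only [Nat.fib_one, Nat.cast_one, pv_mod_one_of_two_le hm2]
        decide
      · simp only [Nat.fib_two, Nat.cast_one, pv_mod_one_of_two_le hm2]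
        decide
  · unfold fibonacci_again
    have hl : ([0, 1, 1] : List Int) = pvFibModList m (3-1) := by
      simp [pvFibModList]
    have h3 : (3 : Int) = ((3 : Nat) : Int) := by norm_num
    rw [hl, h3]
    exact pv_loop_run m hm n hn (n + 1 - 3) 3 (by norm_num) (by omega) rfl

-- ===== VERDICT (by name: the statement is the Claim_ definition above) =====
theorem fibonacci_again_spec : Claim_unchanged_fibonacci_again := by
  unfold Claim_unchanged_fibonacci_again
  intro n m _ hpre
  unfold Spec_fibonacci_again
  intro hnd
  obtain ⟨hn0, hm⟩ := hpre
  obtain ⟨k, rfl⟩ : ∃ k : Nat, n = (k : Int) := ⟨n.toNat, (Int.toNat_of_nonneg hn0).symm⟩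
  rw [pv_A_eq k m hm hnd, pv_alt_eq m hm k]

theorem fibonacci_again_changed : Claim_changed_fibonacci_again := by
  unfold Claim_changed_fibonacci_again
  refine ⟨by decide, by decide, by decide, by decide, ?_, by decide⟩
  show fibonacci_again_alt 1 1 = 0
  have h := pv_alt_eq 1 (by norm_num) 1
  norm_num [Nat.fib_one] at h
  rw [h]

theorem fibonacci_again_tight : Claim_exact_fibonacci_again := by
  unfold Claim_exact_fibonacci_again
  intro n m _ hpre hd
  obtain ⟨hn0, hm⟩ := hpre
  obtain ⟨hn12, hm1⟩ := hd
  have hA : fibonacci_again n m = 1 := by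
    unfold fibonacci_again
    rw [PySem.List.pyRange_one_eq_nil (by omega)]
    simp only [fibonacci_again_loop]
    rw [if_neg (by simp)]
    rcases hn12 with rfl | rfl <;> decide
  have hB : fibonacci_again_alt n m = PySem.Int.mod 1 m := by
    rcases hn12 with rfl | rfl
    · have h := pv_alt_eq m hm 1
      norm_num [Nat.fib_one] at h
      exact h
    · have h := pv_alt_eq m hm 2
      norm_num [Nat.fib_two] at h
      exact h
  rw [hA, hB]
  rcases hm1 with rfl | hmneg
  · decide
  · have h := (PySem.Int.mod_neg_bounds (a := (1:Int)) hmneg).2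
    omega
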